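-- pv_equiv track=rewrite | github.com/akash29/Practice_problems | CCI/16.8_English_Int.py | construct_str_util
-- ===== SOURCE A (Python) =====
-- num_units_maps = {4:"billion ",3:"million ",2:"thousand ",1:" ", 0: " "}
--
-- num_to_english_single = {0:"",1:"one", 2:"two", 3:"three", 4:"four", 5:"five",
--                       6:"six",7:"seven",8:"eight",9:"nine"}
--
-- num_to_english_tys={2:"twen",3:"thirt",5:"fif"}
--
-- num_to_english_two = {10:"ten",11:"eleven",12:"twelve",13:"thirteen"}
--
-- def construct_str_util(s,l,new_str):
--     len_str = len(str(s))
--     if len_str == 3: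
--         char1 = int(str(s)[0])
--         out_str = num_to_english_single[char1]+" hundred"
--         temp_num = int(str(s)[1:])
--         return construct_str_util(temp_num,l,out_str)
--     elif len_str == 2:
--         if s not in num_to_english_two.keys():
--             char1 = int(str(s)[0])
--             if char1 not in num_to_english_tys.keys():
--                 new_str += " "+num_to_english_single[char1]+"ty"
--                 temp_num = int(str(s)[1:])
--                 return construct_str_util(temp_num, l, new_str)
--             else:
--                 new_str += " "+num_to_english_tys[char1]+"ty"
--                 temp_num = int(str(s)[1:])
--                 return construct_str_util(temp_num, l, new_str)
--
--         else:
--             new_str += " "+num_to_english_two[s]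
--             return construct_str_util(0,l,new_str)
--
--     else:
--         return new_str+" "+num_to_english_single[s]+" "+num_units_maps[l]
-- ===== SOURCE B (Python) =====
-- num_units_maps = {4: "billion ", 3: "million ", 2: "thousand ", 1: " ", 0: " "}
--
-- num_to_english_single = {0: "", 1: "one", 2: "two", 3: "three", 4: "four", 5: "five",
--                          6: "six", 7: "seven", 8: "eight", 9: "nine"}
--
-- num_to_english_tys = {2: "twen", 3: "thirt", 5: "fif"}
--
-- num_to_english_two = {10: "ten", 11: "eleven", 12: "twelve", 13: "thirteen"}
--
--
-- def construct_str_util(s, l, new_str):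
--     # Flat, non-recursive spell-out using arithmetic instead of string slicing.
--     if 100 <= s <= 999:
--         base = num_to_english_single[s // 100] + " hundred"
--         rem = s % 100
--     else:
--         base = new_str
--         rem = s
--     if 10 <= rem <= 99:
--         if rem in num_to_english_two:
--             base += " " + num_to_english_two[rem]
--             last = 0
--         else:
--             tens = rem // 10
--             base += " " + num_to_english_tys.get(tens, num_to_english_single[tens]) + "ty"
--             last = rem % 10
--     else:
--         last = rem
--     return base + " " + num_to_english_single[last] + " " + num_units_maps[l]
-- ===== Notes on version B (the rewrite author's own statement) =====
-- stated objective: simpler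
-- what changed: Replaces A's recursion over str(s) with string slicing/re-parsing by a single flat pass that extracts digit groups arithmetically (s//100, s%100, rem//10, rem%10) and builds the result with straight-line conditionals, no recursion and no int<->str round-trips.
import Mathlib
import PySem

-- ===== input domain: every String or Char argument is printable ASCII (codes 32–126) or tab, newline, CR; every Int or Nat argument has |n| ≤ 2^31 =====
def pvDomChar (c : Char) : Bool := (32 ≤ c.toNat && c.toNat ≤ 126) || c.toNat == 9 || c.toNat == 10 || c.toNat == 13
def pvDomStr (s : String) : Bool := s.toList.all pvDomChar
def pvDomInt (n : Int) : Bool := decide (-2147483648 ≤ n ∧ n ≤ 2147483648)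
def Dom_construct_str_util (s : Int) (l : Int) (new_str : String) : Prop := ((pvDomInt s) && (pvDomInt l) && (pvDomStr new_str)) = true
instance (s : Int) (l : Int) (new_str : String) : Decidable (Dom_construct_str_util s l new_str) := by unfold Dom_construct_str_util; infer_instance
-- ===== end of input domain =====

-- B replaces A's recursive, string-slicing spell-out by a flat non-recursive pass using
-- integer arithmetic (s // 100, s % 100, rem // 10, rem % 10); objective: simpler.


-- ===== PORT A =====
-- the module-level dicts (string values kept as List Char so the kernel can reduce appends)
def num_units_maps : PySem.Dict Int (List Char) :=
  PySem.Dict.ofList [(4, "billion ".toList), (3, "million ".toList), (2, "thousand ".toList),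
                     (1, " ".toList), (0, " ".toList)]
def num_to_english_single : PySem.Dict Int (List Char) :=
  PySem.Dict.ofList [(0, "".toList), (1, "one".toList), (2, "two".toList), (3, "three".toList),
                     (4, "four".toList), (5, "five".toList), (6, "six".toList), (7, "seven".toList),
                     (8, "eight".toList), (9, "nine".toList)]
def num_to_english_tys : PySem.Dict Int (List Char) :=
  PySem.Dict.ofList [(2, "twen".toList), (3, "thirt".toList), (5, "fif".toList)]
def num_to_english_two : PySem.Dict Int (List Char) :=
  PySem.Dict.ofList [(10, "ten".toList), (11, "eleven".toList), (12, "twelve".toList), (13, "thirteen".toList)]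

-- literal transliteration of A's recursion on List Char; fuel 5 only makes the recursion
-- structural (the call chain is at most 4 deep on every input); [] stands for the paths where
-- the Python raises (KeyError / ValueError), which Pre_ excludes.
def pvA_go : Nat → Int → Int → List Char → List Char
  | 0, _, _, _ => []
  | fuel + 1, s, l, new_str =>
    let len_str := (PySem.Int.toChars s).length
    if len_str = 3 then
      match PySem.List.pyGet? (PySem.Int.toChars s) 0 with
      | none => []
      | some c =>
        match PySem.Int.ofChars? [c] with
        | none => []  -- int(str(s)[0]) raises ValueError
        | some char1 =>
          let out_str := num_to_english_single.getD char1 [] ++ " hundred".toList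
          match PySem.Int.ofChars? (PySem.List.slice (PySem.Int.toChars s) (some 1) none) with
          | none => []
          | some temp_num => pvA_go fuel temp_num l out_str
    else if len_str = 2 then
      if ¬ num_to_english_two.contains s then
        match PySem.List.pyGet? (PySem.Int.toChars s) 0 with
        | none => []
        | some c =>
          match PySem.Int.ofChars? [c] with
          | none => []  -- int(str(s)[0]) raises ValueError (negative s)
          | some char1 =>
            if ¬ num_to_english_tys.contains char1 then
              let new_str' := new_str ++ (" ".toList ++ num_to_english_single.getD char1 [] ++ "ty".toList)
              match PySem.Int.ofChars? (PySem.List.slice (PySem.Int.toChars s) (some 1) none) with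
              | none => []
              | some temp_num => pvA_go fuel temp_num l new_str'
            else
              let new_str' := new_str ++ (" ".toList ++ num_to_english_tys.getD char1 [] ++ "ty".toList)
              match PySem.Int.ofChars? (PySem.List.slice (PySem.Int.toChars s) (some 1) none) with
              | none => []
              | some temp_num => pvA_go fuel temp_num l new_str'
      else
        pvA_go fuel 0 l (new_str ++ (" ".toList ++ num_to_english_two.getD s []))
    else
      new_str ++ " ".toList ++ num_to_english_single.getD s [] ++ " ".toList ++ num_units_maps.getD l []

def construct_str_util (s : Int) (l : Int) (new_str : String) : String :=
  String.ofList (pvA_go 5 s l new_str.toList)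

-- ===== PORT B =====
-- transliteration of Source B: flat, non-recursive, arithmetic digit extraction.
def pvB (s : Int) (l : Int) (new_str : List Char) : List Char :=
  let p1 : List Char × Int :=
    if 100 ≤ s ∧ s ≤ 999 then
      (num_to_english_single.getD (PySem.Int.floordiv s 100) [] ++ " hundred".toList, PySem.Int.mod s 100)
    else
      (new_str, s)
  let base := p1.1
  let rem := p1.2
  let p2 : List Char × Int :=
    if 10 ≤ rem ∧ rem ≤ 99 then
      if num_to_english_two.contains rem then
        (base ++ (" ".toList ++ num_to_english_two.getD rem []), 0)
      else
        let tens := PySem.Int.floordiv rem 10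
        (base ++ (" ".toList ++ num_to_english_tys.getD tens (num_to_english_single.getD tens []) ++ "ty".toList),
         PySem.Int.mod rem 10)
    else
      (base, rem)
  p2.1 ++ " ".toList ++ num_to_english_single.getD p2.2 [] ++ " ".toList ++ num_units_maps.getD l []

def construct_str_util_alt (s : Int) (l : Int) (new_str : String) : String :=
  String.ofList (pvB s l new_str.toList)

-- ===== PRECONDITION & SPEC =====
-- Pre_ excludes exactly the inputs on which A raises: KeyError on num_units_maps[l] for l
-- outside 0..4 and on num_to_english_single[s] for s ≥ 1000 or s ≤ -100, ValueError from
-- int('-') for -99 ≤ s ≤ -1.  A returns on every input satisfying Pre_.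
def Pre_construct_str_util (s : Int) (l : Int) (new_str : String) : Prop :=
  0 ≤ s ∧ s ≤ 999 ∧ 0 ≤ l ∧ l ≤ 4
instance (s : Int) (l : Int) (new_str : String) : Decidable (Pre_construct_str_util s l new_str) := by
  unfold Pre_construct_str_util; infer_instance
def pvWitness_construct_str_util : Int × Int × String := (345, 2, "zz")
def Spec_construct_str_util (s : Int) (l : Int) (new_str : String) (out : String) : Prop := out = construct_str_util_alt s l new_str
instance (s : Int) (l : Int) (new_str : String) (out : String) : Decidable (Spec_construct_str_util s l new_str out) := by unfold Spec_construct_str_util; infer_instance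

-- ===== CLAIM (what is proved, stated in full; the proofs are below) =====
def Claim_equal_construct_str_util : Prop := ∀ (s : Int) (l : Int) (new_str : String), Dom_construct_str_util s l new_str → Pre_construct_str_util s l new_str → Spec_construct_str_util s l new_str (construct_str_util s l new_str)

-- ===== LEMMAS AND PROOFS =====
set_option maxHeartbeats 12000000 in
theorem key : ∀ (s l : Int) (cs : List Char), 0 ≤ s → s ≤ 999 →
    pvA_go 5 s l cs = pvB s l cs := by
  intro s l cs hs0 hs1
  interval_cases s <;> rfl

-- ===== VERDICT (by name: the statement is the Claim_ definition above) =====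
theorem construct_str_util_spec : Claim_equal_construct_str_util := by
  intro s l ns _ hpre
  obtain ⟨hs0, hs1, _, _⟩ := hpre
  unfold Spec_construct_str_util construct_str_util construct_str_util_alt
  rw [key s l ns.toList hs0 hs1]
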